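-- pv_equiv track=rewrite | github.com/palver123/Ericsson_2019 | stats.py | router_groups
-- ===== SOURCE A (Python) =====
-- def router_groups(txt, c='1'):
--     res = []
--     ll = 0
--     for t in txt:
--         if t == c:
--             ll = ll + 1
--         else:
--             if ll > 0:
--                 res.append(ll)
--             ll = 0
--     if ll > 0:
--         if txt.startswith(c) and len(res) > 0:
--             res[0] = res[0] + ll
--         else:
--             res.append(ll)
--     return tuple(sorted(res, reverse=True))
-- ===== SOURCE B (Python) =====
-- def router_groups(txt, c='1'):
--     # run-length encode the whole text, then filter and fix the circular wrap
--     runs = []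
--     i = 0
--     n = len(txt)
--     while i < n:
--         j = i
--         while j < n and txt[j] == txt[i]:
--             j += 1
--         runs.append((txt[i], j - i))
--         i = j
--     lengths = [m for ch, m in runs if ch == c]
--     if len(runs) > 1 and runs[0][0] == c and runs[-1][0] == c:
--         lengths[0] += lengths[-1]
--         lengths.pop()
--     return tuple(sorted(lengths, reverse=True))
-- ===== Notes on version B (the rewrite author's own statement) =====
-- stated objective: alternative
-- what changed: B first run-length-encodes the whole text into a (char, length) table, then filters the runs of c and merges the circular wrap by a post-processing step on the table's ends, instead of A's single inline pass that accumulates only c-runs and patches res[0] at the end.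
import Mathlib
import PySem

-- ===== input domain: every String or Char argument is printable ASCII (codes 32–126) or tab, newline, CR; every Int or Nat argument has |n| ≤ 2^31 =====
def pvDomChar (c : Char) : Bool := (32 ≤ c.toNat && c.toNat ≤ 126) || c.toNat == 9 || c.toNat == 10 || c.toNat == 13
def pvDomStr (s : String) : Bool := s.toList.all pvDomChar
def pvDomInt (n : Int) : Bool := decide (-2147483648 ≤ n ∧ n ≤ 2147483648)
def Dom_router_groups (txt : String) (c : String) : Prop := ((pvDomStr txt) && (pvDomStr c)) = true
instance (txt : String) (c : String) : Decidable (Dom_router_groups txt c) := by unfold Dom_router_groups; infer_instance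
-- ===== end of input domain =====

-- B run-length-encodes the text into a (char, length) table and post-processes the
-- table's ends for the circular wrap, instead of A's inline accumulate-and-patch pass
-- (objective: alternative; same cost).

-- ===== PORT A =====
-- A's loop body: count the current run of c, flush it on a non-c character
def pvStepA (c : String) (p : List Int × Int) (t : Char) : List Int × Int :=
  if String.ofList [t] = c then (p.1, p.2 + 1)
  else (if p.2 > 0 then p.1 ++ [p.2] else p.1, (0 : Int))

def router_groups (txt : String) (c : String) : List Int :=
  let st := txt.toList.foldl (pvStepA c) ([], 0)
  let res :=
    if st.2 > 0 then
      if PySem.Str.startswith txt c ∧ 0 < st.1.length then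
        match st.1 with
        | [] => []              -- unreachable: guard requires 0 < st.1.length
        | x :: xs => (x + st.2) :: xs
      else st.1 ++ [st.2]
    else st.1
  PySem.List.sorted res (fun x => x) true

-- ===== PORT B =====
-- run-length encoding of the character list (inner while-loop = counting recursion)
def pvRleAux (ch : Char) (n : Int) : List Char → List (Char × Int)
  | [] => [(ch, n)]
  | t :: ts => if t = ch then pvRleAux ch (n + 1) ts else (ch, n) :: pvRleAux t 1 ts

def pvRle : List Char → List (Char × Int)
  | [] => []
  | t :: ts => pvRleAux t 1 ts

def pvIsC (c : String) (p : Char × Int) : Bool := String.ofList [p.1] == c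

-- lengths = [m for ch, m in runs if ch == c]
def pvLens (c : String) (rs : List (Char × Int)) : List Int :=
  (rs.filter (pvIsC c)).map Prod.snd

def router_groups_alt (txt : String) (c : String) : List Int :=
  let runs := pvRle txt.toList
  let lengths := pvLens c runs
  let merged :=
    if decide (1 < runs.length) && ((runs.head?.map (pvIsC c)).getD false)
         && ((runs.getLast?.map (pvIsC c)).getD false) then
      ((lengths.headD 0 + lengths.getLastD 0) :: lengths.tail).dropLast
    else lengths
  PySem.List.sorted merged (fun x => x) true

-- ===== PRECONDITION & SPEC =====
def Spec_router_groups (txt : String) (c : String) (out : List Int) : Prop := out = router_groups_alt txt c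
instance (txt : String) (c : String) (out : List Int) : Decidable (Spec_router_groups txt c out) := by unfold Spec_router_groups; infer_instance

-- ===== CLAIM (what is proved, stated in full; the proofs are below) =====
def Claim_equal_router_groups : Prop := ∀ (txt : String) (c : String), Dom_router_groups txt c → Spec_router_groups txt c (router_groups txt c)

-- ===== LEMMAS AND PROOFS =====

lemma pvRleAux_ne_nil (ch : Char) (n : Int) (l : List Char) : pvRleAux ch n l ≠ [] := by
  induction l generalizing ch n with
  | nil => simp [pvRleAux]
  | cons t ts ih => by_cases h : t = ch <;> simp [pvRleAux, h, ih]

lemma pvGetLast?_cons {α : Type} (a : α) (l : List α) (h : l ≠ []) :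
    (a :: l).getLast? = l.getLast? := by
  cases l with
  | nil => exact absurd rfl h
  | cons b t => simp [List.getLast?_cons_cons]

lemma pvRleAux_head (ch : Char) (n : Int) (l : List Char) :
    ∃ m, (pvRleAux ch n l).head? = some (ch, m) := by
  induction l generalizing n with
  | nil => exact ⟨n, rfl⟩
  | cons t ts ih =>
      by_cases h : t = ch
      · simpa [pvRleAux, h] using ih (n + 1)
      · exact ⟨n, by simp [pvRleAux, h]⟩

lemma pvSingleton_inj {t ch : Char} (h : String.ofList [t] = String.ofList [ch]) : t = ch := by
  have h2 := congrArg String.toList h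
  simpa using h2

-- main loop invariant: A's fold over l with pending run (ch, n) computes the
-- c-run lengths of the RLE, deferring the final run in its second component.
lemma pvMain (c : String) (l : List Char) : ∀ (ch : Char) (n : Int) (res : List Int), 1 ≤ n →
    ∃ a k, (pvRleAux ch n l).getLast? = some (a, k) ∧ 1 ≤ k ∧
      (l.foldl (pvStepA c) (res, if String.ofList [ch] = c then n else 0)).1
          ++ (if String.ofList [a] = c then [k] else []) = res ++ pvLens c (pvRleAux ch n l) ∧
      (l.foldl (pvStepA c) (res, if String.ofList [ch] = c then n else 0)).2
          = (if String.ofList [a] = c then k else 0) := by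
  induction l with
  | nil =>
      intro ch n res hn
      refine ⟨ch, n, rfl, hn, ?_, ?_⟩ <;>
        by_cases h : String.ofList [ch] = c <;> simp [pvRleAux, pvLens, pvIsC, h]
  | cons t ts ih =>
      intro ch n res hn
      by_cases h : t = ch
      · subst h
        have hstep : pvStepA c (res, if String.ofList [t] = c then n else 0) t
            = (res, if String.ofList [t] = c then n + 1 else 0) := by
          by_cases hp : String.ofList [t] = c <;>
            simp [pvStepA, hp]
        obtain ⟨a, k, h1, h2, h3, h4⟩ := ih t (n + 1) res (by omega)
        refine ⟨a, k, ?_, h2, ?_, ?_⟩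
        · simpa [pvRleAux] using h1
        · simpa [pvRleAux, List.foldl_cons, hstep] using h3
        · simpa [pvRleAux, List.foldl_cons, hstep] using h4
      · -- t ≠ ch: the pending run (ch, n) is emitted, a new run of t starts
        have hne := pvRleAux_ne_nil t 1 ts
        have hstep : pvStepA c (res, if String.ofList [ch] = c then n else 0) t
            = ((if String.ofList [ch] = c then res ++ [n] else res),
               if String.ofList [t] = c then 1 else 0) := by
          by_cases hp : String.ofList [t] = c
          · have hchc : ¬ String.ofList [ch] = c :=
              fun hc => h (pvSingleton_inj (hp.trans hc.symm))
            simp [pvStepA, hp, hchc]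
          · by_cases hc : String.ofList [ch] = c
            · simp [pvStepA, hp, hc, show (0:Int) < n by omega]
            · simp [pvStepA, hp, hc]
        obtain ⟨a, k, h1, h2, h3, h4⟩ :=
          ih t 1 (if String.ofList [ch] = c then res ++ [n] else res) (le_refl 1)
        refine ⟨a, k, ?_, h2, ?_, ?_⟩
        · rw [show pvRleAux ch n (t :: ts) = (ch, n) :: pvRleAux t 1 ts from by
              simp [pvRleAux, h], pvGetLast?_cons _ _ hne]
          exact h1
        · by_cases hc : String.ofList [ch] = c
          · rw [if_pos hc] at hstep
            simpa [pvRleAux, h, List.foldl_cons, hstep, hc, pvLens, pvIsC,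
                   List.filter_cons] using h3
          · rw [if_neg hc] at hstep
            simpa [pvRleAux, h, List.foldl_cons, hstep, hc, pvLens, pvIsC,
                   List.filter_cons] using h3
        · simpa [pvRleAux, h, List.foldl_cons, hstep] using h4

-- helper: if the first and last runs both match c and there are ≥ 2 runs,
-- then at least two runs survive the filter.
lemma pvLens_two (c : String) (rs : List (Char × Int)) (h2 : 1 < rs.length)
    (p q : Char × Int) (hh : rs.head? = some p) (hl : rs.getLast? = some q)
    (hp : pvIsC c p = true) (hq : pvIsC c q = true) :
    2 ≤ (pvLens c rs).length := by
  cases rs with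
  | nil => simp at h2
  | cons p' rest =>
    cases rest with
    | nil => simp at h2
    | cons r rest' =>
      have hp' : p' = p := by simpa using hh
      have hqmem : q ∈ r :: rest' := by
        have hl' : (r :: rest').getLast? = some q := by
          simpa [pvGetLast?_cons] using hl
        exact List.mem_of_getLast? hl'
      have hqf : q ∈ (r :: rest').filter (pvIsC c) := List.mem_filter.mpr ⟨hqmem, hq⟩
      have h1 : 0 < ((r :: rest').filter (pvIsC c)).length := List.length_pos_of_mem hqf
      have hlen : (pvLens c (p' :: r :: rest')).length
          = ((r :: rest').filter (pvIsC c)).length + 1 := by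
        simp [pvLens, List.filter_cons, hp', hp]
      omega

lemma pvKey (txt c : String) : router_groups txt c = router_groups_alt txt c := by
  unfold router_groups router_groups_alt
  rcases htxt : txt.toList with _ | ⟨t, ts⟩
  · simp [pvRle, pvLens]
  · obtain ⟨a, k, h1, h2, h3, h4⟩ := pvMain c ts t 1 [] (le_refl 1)
    simp only [List.nil_append] at h3
    obtain ⟨m, hhead⟩ := pvRleAux_head t 1 ts
    have hstep0 : pvStepA c (([] : List Int), (0 : Int)) t
        = ([], if String.ofList [t] = c then 1 else 0) := by
      by_cases hp : String.ofList [t] = c <;> simp [pvStepA, hp]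
    simp only [List.foldl_cons, hstep0, pvRle]
    by_cases hPa : String.ofList [a] = c
    · rw [if_pos hPa] at h4
      rw [if_pos hPa] at h3
      have hk : (0 : Int) < k := by omega
      by_cases hPt : String.ofList [t] = c
      · -- text both starts and ends with a run of c
        have hta : t = a := pvSingleton_inj (hPt.trans hPa.symm)
        have hcl : c.toList = [a] := by rw [← hPa]; simp
        have hsw' : PySem.Chars.startswith txt.toList c.toList = true := by
          refine (PySem.Chars.startswith_iff _ _).mpr ?_
          rw [hcl, htxt, hta]
          exact ⟨ts, rfl⟩
        have hhd : ((pvRleAux t 1 ts).head?.map (pvIsC c)).getD false = true := by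
          simp [hhead, pvIsC, hPt]
        have hlst : ((pvRleAux t 1 ts).getLast?.map (pvIsC c)).getD false = true := by
          simp [h1, pvIsC, hPa]
        rcases hF : (List.foldl (pvStepA c)
            ([], if String.ofList [t] = c then 1 else 0) ts).1 with _ | ⟨x, xs⟩
        · -- no completed run of c before the end: no wrap merge on either side
          rw [hF] at h3
          simp only [List.nil_append] at h3
          have hnlen : ¬ 1 < (pvRleAux t 1 ts).length := by
            intro hlt
            have h2le := pvLens_two c (pvRleAux t 1 ts) hlt (t, m) (a, k)
              hhead h1 (by simp [pvIsC, hPt]) (by simp [pvIsC, hPa])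
            rw [← h3] at h2le
            simp at h2le
          simp [h4, hk, hnlen, ← h3]
        · -- wrap merge on both sides
          rw [hF] at h3
          have hlen2 : 2 ≤ (pvLens c (pvRleAux t 1 ts)).length := by
            rw [← h3]; simp
          have hrs2 : 1 < (pvRleAux t 1 ts).length := by
            have hle : (pvLens c (pvRleAux t 1 ts)).length ≤ (pvRleAux t 1 ts).length := by
              simpa [pvLens] using List.length_filter_le (pvIsC c) (pvRleAux t 1 ts)
            omega
          have hmerge : (((pvLens c (pvRleAux t 1 ts)).head?.getD 0
                + (pvLens c (pvRleAux t 1 ts)).getLast?.getD 0)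
                :: (pvLens c (pvRleAux t 1 ts)).tail).dropLast = (x + k) :: xs := by
            rw [← h3]
            rw [show x :: xs ++ [k] = (x :: xs) ++ [k] from rfl, List.getLast?_concat]
            simp only [List.cons_append, List.head?_cons, Option.getD_some, List.tail_cons]
            rw [show (x + k) :: (xs ++ [k]) = ((x + k) :: xs) ++ [k] from rfl,
               List.dropLast_concat]
          simp [h4, hk, hsw', hrs2, hhd, hlst, hmerge]
      · -- text ends with a run of c but does not start with one: append, no wrap merge
        have hcl : c.toList = [a] := by rw [← hPa]; simp
        have hsw' : PySem.Chars.startswith txt.toList c.toList = false := by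
          cases hE : PySem.Chars.startswith txt.toList c.toList with
          | false => rfl
          | true =>
              have hpre := (PySem.Chars.startswith_iff _ _).mp hE
              rw [hcl, htxt] at hpre
              obtain ⟨rest, hrest⟩ := hpre
              simp only [List.cons_append, List.cons.injEq] at hrest
              exact absurd (by rw [← hrest.1]; exact hPa) hPt
        have hhd : ((pvRleAux t 1 ts).head?.map (pvIsC c)).getD false = false := by
          simp [hhead, pvIsC, hPt]
        simp [h4, hk, hsw', hhd, ← h3]
    · -- the final run is not a run of c: nothing pending, no merge
      rw [if_neg hPa] at h4
      simp only [if_neg hPa, List.append_nil] at h3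
      have hlst : ((pvRleAux t 1 ts).getLast?.map (pvIsC c)).getD false = false := by
        simp [h1, pvIsC, hPa]
      simp [h4, hlst, ← h3]

-- ===== VERDICT (by name: the statement is the Claim_ definition above) =====
theorem router_groups_spec : Claim_equal_router_groups := by
  intro txt c _
  unfold Spec_router_groups
  exact pvKey txt c
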